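-- pv_equiv track=rewrite | github.com/DanilAndreev/itrack | python/tracker_model.py | _pretty_layer_path
-- ===== SOURCE A (Python) =====
-- def _pretty_layer_path(raw_path):
--     parts = raw_path.split(".")
--     pretty_parts = []
--     for part in parts:
--         if part.isdigit() and pretty_parts:
--             pretty_parts[-1] = f"{pretty_parts[-1]}[{part}]"
--         else:
--             pretty_parts.append(part)
--     return ".".join(pretty_parts)
-- ===== SOURCE B (Python) =====
-- def _pretty_layer_path(raw_path):
--     # One pass over the characters: a '.' followed by a full run of digits that
--     # ends the string or is followed by another '.' becomes '[digits]'.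
--     out = []
--     i = 0
--     n = len(raw_path)
--     while i < n:
--         c = raw_path[i]
--         if c == '.':
--             j = i + 1
--             while j < n and '0' <= raw_path[j] <= '9':
--                 j += 1
--             if j > i + 1 and (j == n or raw_path[j] == '.'):
--                 out.append('[' + raw_path[i + 1:j] + ']')
--                 i = j
--                 continue
--         out.append(c)
--         i += 1
--     return ''.join(out)
-- ===== Notes on version B (the rewrite author's own statement) =====
-- stated objective: alternative
-- what changed: B replaces A's split-on-dot / accumulator-list / re-join pipeline with a single left-to-right character scan that, at each dot followed by a full digit run ending the string or followed by another dot, emits the run wrapped in square brackets and otherwise copies the character, building the output directly.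
import Mathlib
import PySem

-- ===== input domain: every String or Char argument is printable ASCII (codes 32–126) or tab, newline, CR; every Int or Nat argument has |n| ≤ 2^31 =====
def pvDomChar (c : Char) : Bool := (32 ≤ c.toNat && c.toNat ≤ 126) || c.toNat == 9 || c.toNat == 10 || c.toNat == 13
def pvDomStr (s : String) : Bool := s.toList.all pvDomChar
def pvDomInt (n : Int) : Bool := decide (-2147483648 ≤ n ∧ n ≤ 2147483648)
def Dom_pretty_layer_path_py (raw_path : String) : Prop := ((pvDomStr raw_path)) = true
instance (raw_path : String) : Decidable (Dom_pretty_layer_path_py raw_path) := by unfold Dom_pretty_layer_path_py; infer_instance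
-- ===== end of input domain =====

-- B replaces A's split/accumulate/join pipeline with a single left-to-right character scan; same results, proved equal.


-- ===== PORT A =====
-- the body of A's for-loop: merge a digit part into the last pretty part, else append it
def pvStepA (acc : List (List Char)) (part : List Char) : List (List Char) :=
  if PySem.Chars.strIsdigit part && !acc.isEmpty then
    acc.dropLast ++ [acc.getLastD [] ++ ('[' :: (part ++ [']']))]
  else
    acc ++ [part]

def pretty_layer_path_py (raw_path : String) : String :=
  let parts := PySem.Chars.splitOn raw_path.toList ['.']
  let pretty_parts := parts.foldl pvStepA []
  String.ofList (PySem.Chars.join ['.'] pretty_parts)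

-- ===== PORT B =====
-- B's digit test `'0' <= raw_path[j] <= '9'`
def pvIsDigitB (d : Char) : Bool := decide ('0' ≤ d) && decide (d ≤ '9')

-- B's while-loop: at a dot, take the run of ASCII digits after it; if the run is
-- nonempty and ends the string or is followed by another dot, emit the run wrapped
-- in square brackets and resume after it.
def pvScanB : List Char → List Char
  | [] => []
  | c :: rest =>
    if c = '.' then
      let digits := rest.takeWhile pvIsDigitB
      let rest' := rest.dropWhile pvIsDigitB
      if digits ≠ [] ∧ (rest' = [] ∨ rest'.headI = '.') then
        '[' :: (digits ++ ']' :: pvScanB rest')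
      else
        c :: pvScanB rest
    else
      c :: pvScanB rest
termination_by l => l.length
decreasing_by
  · simpa using Nat.lt_succ_of_le (List.length_dropWhile_le _ _)
  · simp
  · simp

def pretty_layer_path_py_alt (raw_path : String) : String :=
  String.ofList (pvScanB raw_path.toList)

-- ===== PRECONDITION & SPEC =====
def Spec_pretty_layer_path_py (raw_path : String) (out : String) : Prop := out = pretty_layer_path_py_alt raw_path
instance (raw_path : String) (out : String) : Decidable (Spec_pretty_layer_path_py raw_path out) := by unfold Spec_pretty_layer_path_py; infer_instance

-- ===== CLAIM (what is proved, stated in full; the proofs are below) =====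
def Claim_equal_pretty_layer_path_py : Prop := ∀ (raw_path : String), Dom_pretty_layer_path_py raw_path → Spec_pretty_layer_path_py raw_path (pretty_layer_path_py raw_path)

-- ===== LEMMAS AND PROOFS =====

-- proof-only reference splitter: Python's s.split(".") as plain structural recursion
def pvSplit : List Char → List (List Char)
  | [] => [[]]
  | c :: cs =>
    if c = '.' then [] :: pvSplit cs
    else
      match pvSplit cs with
      | [] => [[c]]
      | p :: ps => (c :: p) :: ps

-- what one part contributes after the first: brackets glued on, or a dot prefix
def pvG (p : List Char) : List Char :=
  if PySem.Chars.strIsdigit p then '[' :: (p ++ [']']) else '.' :: p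

theorem pvSplit_ne_nil (l : List Char) : pvSplit l ≠ [] := by
  cases l with
  | nil => simp [pvSplit]
  | cons c cs =>
    simp only [pvSplit]
    split
    · simp
    · split <;> simp

theorem pvSplit_cons (l : List Char) : pvSplit l = (pvSplit l).headI :: (pvSplit l).tail := by
  have := pvSplit_ne_nil l
  cases h : pvSplit l with
  | nil => exact absurd h this
  | cons p ps => simp

theorem pv_go_spec (fuel : Nat) : ∀ (l cur acc : _), l.length < fuel →
    PySem.Chars.splitOn.go ['.'] fuel l cur acc
      = acc.reverse ++ (cur.reverse ++ (pvSplit l).headI) :: (pvSplit l).tail := by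
  induction fuel with
  | zero => intro l cur acc h; omega
  | succ f ih =>
    intro l cur acc h
    cases l with
    | nil =>
      rw [PySem.Chars.splitOn.go]
      · simp [pvSplit]
      · omega
    | cons c rest =>
      have hrest : rest.length < f := by simpa using Nat.lt_of_succ_lt_succ h
      obtain ⟨p, ps, hsp⟩ : ∃ p ps, pvSplit rest = p :: ps :=
        ⟨(pvSplit rest).headI, (pvSplit rest).tail, pvSplit_cons rest⟩
      rw [PySem.Chars.splitOn.go]
      by_cases hc : c = '.'
      · subst hc
        rw [if_pos (by simp [List.isPrefixOf])]
        rw [ih _ [] _ (by simpa using hrest)]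
        simp [pvSplit, hsp]
      · rw [if_neg (by simp [List.isPrefixOf, Ne.symm hc])]
        rw [ih rest (c :: cur) acc hrest]
        simp [pvSplit, hc, hsp]

theorem pv_splitOn_dot (cs : List Char) : PySem.Chars.splitOn cs ['.'] = pvSplit cs := by
  unfold PySem.Chars.splitOn
  rw [pv_go_spec (cs.length + 1) cs [] [] (Nat.lt_succ_self _)]
  simpa using (pvSplit_cons cs).symm

theorem pv_join_cons (a : List Char) (X : List (List Char)) (h : X ≠ []) :
    PySem.Chars.join ['.'] (a :: X) = a ++ '.' :: PySem.Chars.join ['.'] X := by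
  cases X with
  | nil => exact absurd rfl h
  | cons q qs => rw [PySem.Chars.join_cons_cons]; simp

theorem pv_join_snoc (acc : List (List Char)) (p : List Char) (h : acc ≠ []) :
    PySem.Chars.join ['.'] (acc ++ [p]) = PySem.Chars.join ['.'] acc ++ '.' :: p := by
  induction acc with
  | nil => exact absurd rfl h
  | cons a t ih =>
    cases t with
    | nil => simp [pv_join_cons, PySem.Chars.join_singleton]
    | cons b ts =>
      rw [List.cons_append, pv_join_cons a _ (by simp), pv_join_cons a _ (by simp),
        ih (by simp)]
      simp

theorem pv_join_setlast (acc : List (List Char)) (t : List Char) (h : acc ≠ []) :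
    PySem.Chars.join ['.'] (acc.dropLast ++ [acc.getLastD [] ++ t])
      = PySem.Chars.join ['.'] acc ++ t := by
  induction acc with
  | nil => exact absurd rfl h
  | cons a s ih =>
    cases s with
    | nil => simp [PySem.Chars.join_singleton]
    | cons b ts =>
      have hne : (b :: ts).dropLast ++ [(b :: ts).getLastD [] ++ t] ≠ [] := by simp
      rw [show (a :: b :: ts).dropLast = a :: (b :: ts).dropLast by simp,
        show (a :: b :: ts).getLastD [] = (b :: ts).getLastD [] by simp [],
        List.cons_append, pv_join_cons a _ hne, ih (by simp), pv_join_cons a _ (by simp)]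
      simp

theorem pv_fold_inv (parts : List (List Char)) : ∀ acc, acc ≠ [] →
    PySem.Chars.join ['.'] (parts.foldl pvStepA acc)
      = PySem.Chars.join ['.'] acc ++ (parts.map pvG).flatten := by
  induction parts with
  | nil => intro acc _; simp
  | cons p ps ih =>
    intro acc hacc
    rw [List.foldl_cons]
    by_cases hd : PySem.Chars.strIsdigit p = true
    · have hstep : pvStepA acc p = acc.dropLast ++ [acc.getLastD [] ++ ('[' :: (p ++ [']']))] := by
        simp [pvStepA, hd, hacc]
      rw [hstep, ih _ (by simp), pv_join_setlast acc _ hacc]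
      simp [pvG, hd]
    · have hstep : pvStepA acc p = acc ++ [p] := by
        simp [pvStepA, hd]
      rw [hstep, ih _ (by simp), pv_join_snoc acc p hacc]
      simp [pvG, hd]

theorem pv_A_closed (cs : List Char) :
    PySem.Chars.join ['.'] ((PySem.Chars.splitOn cs ['.']).foldl pvStepA [])
      = (pvSplit cs).headI ++ (((pvSplit cs).tail).map pvG).flatten := by
  rw [pv_splitOn_dot, pvSplit_cons cs, List.foldl_cons]
  have h0 : pvStepA [] (pvSplit cs).headI = [(pvSplit cs).headI] := by
    simp [pvStepA]
  rw [h0, pv_fold_inv _ _ (by simp), PySem.Chars.join_singleton]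
  simp

-- the head of a dropWhile, when nonempty, fails the predicate
theorem pv_headI_dropWhile_false (p : Char → Bool) (l : List Char) (h : l.dropWhile p ≠ []) :
    p ((l.dropWhile p).headI) = false := by
  induction l with
  | nil => exact absurd rfl h
  | cons a t ih =>
    by_cases ha : p a = true
    · rw [List.dropWhile_cons_of_pos ha] at h ⊢
      exact ih h
    · rw [List.dropWhile_cons_of_neg ha]
      simpa using ha

theorem pvSplit_nondot (l : List Char) (h : ∀ c ∈ l, c ≠ '.') : pvSplit l = [l] := by
  induction l with
  | nil => rfl
  | cons c cs ih =>
    have hc : c ≠ '.' := h c (by simp)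
    simp [pvSplit, hc, ih (fun d hd => h d (by simp [hd]))]

theorem pvSplit_pre (pre suf : List Char) (h : ∀ c ∈ pre, c ≠ '.') :
    pvSplit (pre ++ '.' :: suf) = pre :: pvSplit suf := by
  induction pre with
  | nil => simp [pvSplit]
  | cons c cs ih =>
    have hc : c ≠ '.' := h c (by simp)
    simp [pvSplit, hc, ih (fun d hd => h d (by simp [hd]))]

theorem pvSplit_headI (l : List Char) :
    (pvSplit l).headI = l.takeWhile (fun c => !decide (c = '.')) := by
  induction l with
  | nil => rfl
  | cons c cs ih =>
    by_cases hc : c = '.'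
    · subst hc; simp [pvSplit]
    · obtain ⟨p, ps, hsp⟩ : ∃ p ps, pvSplit cs = p :: ps :=
        ⟨(pvSplit cs).headI, (pvSplit cs).tail, pvSplit_cons cs⟩
      rw [List.takeWhile_cons]
      simp only [pvSplit, if_neg hc, hsp, List.headI]
      rw [if_pos (by simp [hc])]
      simp only [hsp, List.headI] at ih
      rw [ih]

theorem pvIsDigitB_ne_dot (c : Char) (h : pvIsDigitB c = true) : c ≠ '.' := by
  intro hc; subst hc; simp [pvIsDigitB] at h

theorem pv_strIsdigit_true (l : List Char) (hne : l ≠ []) (h : ∀ d ∈ l, pvIsDigitB d = true) :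
    PySem.Chars.strIsdigit l = true := by
  cases l with
  | nil => exact absurd rfl hne
  | cons a t =>
    simp only [PySem.Chars.strIsdigit, List.isEmpty_cons, Bool.not_false, Bool.true_and]
    exact List.all_eq_true.mpr fun d hd => by
      simpa [PySem.Chars.isdigit, pvIsDigitB] using h d hd

theorem pv_strIsdigit_parts (l : List Char) (h : PySem.Chars.strIsdigit l = true) :
    l ≠ [] ∧ ∀ d ∈ l, pvIsDigitB d = true := by
  simp only [PySem.Chars.strIsdigit, Bool.and_eq_true, List.all_eq_true] at h
  refine ⟨by simpa [List.isEmpty_iff] using h.1, fun d hd => ?_⟩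
  simpa [PySem.Chars.isdigit, pvIsDigitB] using h.2 d hd

theorem pv_scan_spec : ∀ (n : Nat) (cs : List Char), cs.length ≤ n →
    pvScanB cs = (pvSplit cs).headI ++ (((pvSplit cs).tail).map pvG).flatten := by
  intro n
  induction n with
  | zero =>
    intro cs h
    have : cs = [] := by cases cs <;> simp_all
    subst this
    simp [pvScanB, pvSplit]
  | succ n ih =>
    intro cs h
    cases cs with
    | nil => simp [pvScanB, pvSplit]
    | cons c rest =>
      have hrn : rest.length ≤ n := by simpa using Nat.le_of_succ_le_succ h
      have hsplit_cs : pvSplit ('.' :: rest) = [] :: pvSplit rest := by simp [pvSplit]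
      by_cases hc : c = '.'
      · subst hc
        rw [pvScanB, if_pos rfl]
        generalize hdig : rest.takeWhile pvIsDigitB = digits
        generalize hrst : rest.dropWhile pvIsDigitB = rest'
        have hall : ∀ d ∈ digits, pvIsDigitB d = true := fun d hd =>
          List.mem_takeWhile_imp (hdig ▸ hd)
        have hrec : digits ++ rest' = rest := by
          rw [← hdig, ← hrst]; exact List.takeWhile_append_dropWhile
        by_cases hcond : digits ≠ [] ∧ (rest' = [] ∨ rest'.headI = '.')
        · rw [if_pos hcond]
          obtain ⟨hdne, hor⟩ := hcond
          have hdigit : PySem.Chars.strIsdigit digits = true := pv_strIsdigit_true digits hdne hall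
          have hndot : ∀ d ∈ digits, d ≠ '.' := fun d hd => pvIsDigitB_ne_dot d (hall d hd)
          by_cases hnil : rest' = []
          · -- the digit run ends the string
            have hrd : rest = digits := by rw [← hrec, hnil, List.append_nil]
            have hsr : pvSplit rest = [digits] := by rw [hrd]; exact pvSplit_nondot digits hndot
            rw [hnil, show pvScanB ([] : List Char) = [] from by rw [pvScanB], hsplit_cs, hsr]
            simp [pvG, hdigit]
          · -- the digit run is followed by another '.'
            have hdot : rest'.headI = '.' := by
              rcases hor with hx | hx
              · exact absurd hx hnil
              · exact hx
            obtain ⟨r2, hr2⟩ : ∃ r2, rest' = '.' :: r2 := by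
              cases hrx : rest' with
              | nil => exact absurd hrx hnil
              | cons a t =>
                refine ⟨t, ?_⟩
                rw [hrx] at hdot
                simp only [List.headI] at hdot
                rw [hdot]
            have hsr : pvSplit rest = digits :: pvSplit r2 := by
              rw [← hrec, hr2]; exact pvSplit_pre digits r2 hndot
            have hlen : rest'.length ≤ n :=
              le_trans (by rw [← hrst]; exact List.length_dropWhile_le _ _) hrn
            have hihr : pvScanB rest' = (List.map pvG (pvSplit r2)).flatten := by
              rw [ih rest' hlen, hr2]
              simp [pvSplit]
            rw [hihr, hsplit_cs, hsr]
            simp [pvG, hdigit]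
        · rw [if_neg hcond]
          obtain ⟨p, ps, hsp⟩ : ∃ p ps, pvSplit rest = p :: ps :=
            ⟨(pvSplit rest).headI, (pvSplit rest).tail, pvSplit_cons rest⟩
          -- the first segment of rest is not a nonempty digit run
          have hpd : PySem.Chars.strIsdigit p = false := by
            by_contra hcon
            have hpt : PySem.Chars.strIsdigit p = true := by
              cases hx : PySem.Chars.strIsdigit p
              · exact absurd hx hcon
              · rfl
            obtain ⟨hpn, hpall⟩ := pv_strIsdigit_parts p hpt
            have hphead : p = rest.takeWhile (fun c => !decide (c = '.')) := by
              have h3 := pvSplit_headI rest; rw [hsp] at h3; simpa using h3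
            have hrsplit : p ++ rest.dropWhile (fun c => !decide (c = '.')) = rest := by
              rw [hphead]; exact List.takeWhile_append_dropWhile
            apply hcond
            cases hrx : rest.dropWhile (fun c => !decide (c = '.')) with
            | nil =>
              have hre : rest = p := by rw [← hrsplit, hrx, List.append_nil]
              constructor
              · rw [← hdig, hre, List.takeWhile_eq_self_iff.mpr hpall]; exact hpn
              · left
                rw [← hrst, hre]
                exact List.dropWhile_eq_nil_iff.mpr fun x hx => hpall x hx
            | cons a t =>
              have hadot : a = '.' := by
                have h4 := pv_headI_dropWhile_false (fun c => !decide (c = '.')) rest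
                  (by rw [hrx]; simp)
                rw [hrx] at h4
                simpa using h4
              subst hadot
              have hre : rest = p ++ '.' :: t := by rw [← hrsplit, hrx]
              constructor
              · rw [← hdig, hre, List.takeWhile_append_of_pos hpall,
                  List.takeWhile_cons_of_neg (by simp [pvIsDigitB])]
                simpa using hpn
              · right
                rw [← hrst, hre, List.dropWhile_append_of_pos hpall,
                  List.dropWhile_cons_of_neg (by simp [pvIsDigitB])]
                simp
          rw [ih rest hrn, hsp, hsplit_cs, hsp]
          simp [pvG, hpd]
      · rw [pvScanB, if_neg hc]
        obtain ⟨p, ps, hsp⟩ : ∃ p ps, pvSplit rest = p :: ps :=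
          ⟨(pvSplit rest).headI, (pvSplit rest).tail, pvSplit_cons rest⟩
        rw [ih rest hrn, hsp]
        simp [pvSplit, hc, hsp]

-- ===== VERDICT (by name: the statement is the Claim_ definition above) =====
theorem pretty_layer_path_py_spec : Claim_equal_pretty_layer_path_py := by
  intro raw _
  show pretty_layer_path_py raw = pretty_layer_path_py_alt raw
  simp only [pretty_layer_path_py, pretty_layer_path_py_alt]
  rw [pv_A_closed, pv_scan_spec raw.toList.length raw.toList le_rfl]
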